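-- pv_equiv track=rewrite | github.com/fabiofalopes/.myscripts | youtube-obsidian/lib/token_counter.py | _split_into_word_groups
-- ===== SOURCE A (Python) =====
-- from typing import List, Tuple
--
-- def _split_into_word_groups(text: str, target_tokens: int = 200) -> List[str]:
--     """Split unpunctuated text into word groups of approximately target_tokens.
--
--     Used for auto-generated transcripts that lack punctuation.
--     Creates logical break points for chunking.
--
--     Args:
--         text: Text to split (assumes no sentence punctuation)
--         target_tokens: Target tokens per group (default: 200 for finer control)
--
--     Returns:
--         List[str]: List of word groups
--     """
--     words = text.split()
--
--     if not words:
--         return []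
--
--     # Estimate words per group (roughly 0.75 words per token for English)
--     words_per_group = max(10, int(target_tokens * 0.75))
--
--     groups = []
--     current_group = []
--
--     for word in words:
--         current_group.append(word)
--
--         if len(current_group) >= words_per_group:
--             groups.append(" ".join(current_group))
--             current_group = []
--
--     # Add remaining words
--     if current_group:
--         groups.append(" ".join(current_group))
--
--     return groups
-- ===== SOURCE B (Python) =====
-- from typing import List
--
-- def _split_into_word_groups(text: str, target_tokens: int = 200) -> List[str]:
--     """Split unpunctuated text into word groups of approximately target_tokens."""
--     words = text.split()
--     if not words:
--         return []
--     words_per_group = max(10, int(target_tokens * 0.75))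
--     return [" ".join(words[i:i + words_per_group])
--             for i in range(0, len(words), words_per_group)]
-- ===== Notes on version B (the rewrite author's own statement) =====
-- stated objective: idiomatic
-- what changed: Replaced the word-by-word accumulator with flush/remainder logic by direct slicing: the result is built from strided chunk start indices with list slices, with no current_group state or trailing-flush branch.
import Mathlib
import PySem

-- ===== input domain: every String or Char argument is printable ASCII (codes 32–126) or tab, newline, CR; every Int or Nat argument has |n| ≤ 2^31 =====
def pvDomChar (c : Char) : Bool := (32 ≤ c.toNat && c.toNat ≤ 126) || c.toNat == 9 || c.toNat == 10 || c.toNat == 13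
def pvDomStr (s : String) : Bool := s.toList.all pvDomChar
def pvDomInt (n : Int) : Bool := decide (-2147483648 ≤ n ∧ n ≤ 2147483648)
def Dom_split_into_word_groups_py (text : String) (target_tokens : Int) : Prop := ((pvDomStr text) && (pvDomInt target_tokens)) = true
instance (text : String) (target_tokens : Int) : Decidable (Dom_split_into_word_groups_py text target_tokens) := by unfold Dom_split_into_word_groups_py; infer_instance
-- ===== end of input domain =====

-- B replaces A's word-by-word accumulator (current_group + flush + trailing flush) by
-- slicing the word list at strided chunk start indices — more idiomatic, same O(n) cost.


-- ===== PORT A =====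
-- one loop step of A: append the word to current_group, flush when it reaches words_per_group
def pvStepA (k : Int) (st : List String × List String) (word : String) : List String × List String :=
  let cur := st.2 ++ [word]
  if k ≤ (cur.length : Int) then (st.1 ++ [PySem.Str.join " " cur], ([] : List String))
  else (st.1, cur)

def split_into_word_groups_py (text : String) (target_tokens : Int) : List String :=
  let words := PySem.Str.split₀ text
  if words = [] then []
  else
    -- int(target_tokens * 0.75): for |target_tokens| ≤ 2^31, target_tokens*0.75 = 3t/4 is an
    -- exact float (3t < 2^53), and int() truncates toward zero = Int.tdiv; exact on Dom.
    let words_per_group : Int := max 10 ((target_tokens * 3).tdiv 4)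
    let st := words.foldl (pvStepA words_per_group) ([], [])
    if st.2 ≠ [] then st.1 ++ [PySem.Str.join " " st.2] else st.1

-- ===== PORT B =====
def split_into_word_groups_py_alt (text : String) (target_tokens : Int) : List String :=
  let words := PySem.Str.split₀ text
  if words = [] then []
  else
    -- same exact reading of int(target_tokens * 0.75) as in port A (exact on Dom)
    let words_per_group : Int := max 10 ((target_tokens * 3).tdiv 4)
    (PySem.List.pyRange 0 (words.length : Int) words_per_group).map
      (fun i => PySem.Str.join " " (PySem.List.slice words (some i) (some (i + words_per_group))))

-- ===== PRECONDITION & SPEC =====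
def Spec_split_into_word_groups_py (text : String) (target_tokens : Int) (out : List String) : Prop := out = split_into_word_groups_py_alt text target_tokens
instance (text : String) (target_tokens : Int) (out : List String) : Decidable (Spec_split_into_word_groups_py text target_tokens out) := by unfold Spec_split_into_word_groups_py; infer_instance

-- ===== CLAIM (what is proved, stated in full; the proofs are below) =====
def Claim_equal_split_into_word_groups_py : Prop := ∀ (text : String) (target_tokens : Int), Dom_split_into_word_groups_py text target_tokens → Spec_split_into_word_groups_py text target_tokens (split_into_word_groups_py text target_tokens)

-- ===== LEMMAS AND PROOFS =====

-- chunks of size n+1 (proof-side reference shape)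
def pvChunks (n : Nat) : List String → List (List String)
  | [] => []
  | w :: ws => (w :: ws.take n) :: pvChunks n (ws.drop n)
termination_by l => l.length
decreasing_by simp

lemma pvChunks_nil (n : Nat) : pvChunks n [] = [] := by rw [pvChunks]

lemma pvChunks_cons' (n : Nat) (w : String) (ws : List String) :
    pvChunks n (w :: ws) = (w :: ws.take n) :: pvChunks n (ws.drop n) := by rw [pvChunks]

lemma pvChunks_cons (n : Nat) (l : List String) (h : l ≠ []) :
    pvChunks n l = l.take (n+1) :: pvChunks n (l.drop (n+1)) := by
  cases l with
  | nil => exact absurd rfl h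
  | cons w ws => simp [pvChunks_cons']

-- A's fold with a partial group cur (|cur| ≤ n) produces the chunks of cur ++ ws
lemma pvFoldA_chunks (n : Nat) (ws : List String) : ∀ (g cur : List String), cur.length ≤ n →
    (let st := ws.foldl (pvStepA ((n : Int) + 1)) (g, cur)
     if st.2 ≠ [] then st.1 ++ [PySem.Str.join " " st.2] else st.1)
    = g ++ (pvChunks n (cur ++ ws)).map (PySem.Str.join " ") := by
  induction ws with
  | nil =>
    intro g cur hcur
    by_cases hc : cur = []
    · subst hc; simp [pvChunks_nil]
    · cases cur with
      | nil => exact absurd rfl hc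
      | cons c cs =>
        simp only [List.foldl_nil, List.append_nil]
        have hcs : cs.length ≤ n := by simp at hcur; omega
        have h1 : cs.take n = cs := List.take_of_length_le hcs
        have h2 : cs.drop n = [] := List.drop_eq_nil_of_le hcs
        simp [pvChunks_cons', pvChunks_nil, h1, h2]
  | cons w ws ih =>
    intro g cur hcur
    simp only [List.foldl_cons]
    by_cases hfull : cur.length = n
    · have hcond : ((n : Int) + 1) ≤ (((cur ++ [w]).length : Nat) : Int) := by
        simp [hfull]
      have hstep : pvStepA ((n : Int) + 1) (g, cur) w
          = (g ++ [PySem.Str.join " " (cur ++ [w])], ([] : List String)) := by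
        simp [pvStepA]
        omega
      rw [hstep, ih _ [] (by simp)]
      have hne : cur ++ w :: ws ≠ [] := by simp
      rw [pvChunks_cons n _ hne]
      have ht : (cur ++ w :: ws).take (n+1) = cur ++ [w] := by
        have : cur ++ w :: ws = (cur ++ [w]) ++ ws := by simp
        rw [this, List.take_append_of_le_length (by simp [hfull]),
            List.take_of_length_le (by simp [hfull])]
      have hd : (cur ++ w :: ws).drop (n+1) = ws := by
        have : cur ++ w :: ws = (cur ++ [w]) ++ ws := by simp
        rw [this, List.drop_append_of_le_length (by simp [hfull]),
            List.drop_eq_nil_of_le (by simp [hfull])]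
        simp
      simp [ht, hd]
    · have hlt : cur.length < n := lt_of_le_of_ne hcur hfull
      have hcond : ¬ (((n : Int) + 1) ≤ (((cur ++ [w]).length : Nat) : Int)) := by
        simp; omega
      have hstep : pvStepA ((n : Int) + 1) (g, cur) w = (g, cur ++ [w]) := by
        simp only [pvStepA]
        rw [if_neg hcond]
      rw [hstep, ih g (cur ++ [w]) (by simp; omega)]
      simp

-- range(a, b, s) with 0 < s and a < b starts with a
lemma pvPyRange_pos_cons (a b s : Int) (hs : 0 < s) (hab : a < b) :
    PySem.List.pyRange a b s = a :: PySem.List.pyRange (a + s) b s := by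
  rw [PySem.List.pyRange_of_pos _ _ hs, PySem.List.pyRange_of_pos _ _ hs]
  by_cases h2 : a + s < b
  · have hc : ((b - a + s - 1) / s).toNat = ((b - (a + s) + s - 1) / s).toNat + 1 := by
      have he : b - a + s - 1 = (b - (a + s) + s - 1) + 1 * s := by ring
      have : (b - a + s - 1) / s = (b - (a + s) + s - 1) / s + 1 := by
        rw [he, Int.add_mul_ediv_right _ _ (by omega)]
      rw [this]
      have hnn : 0 ≤ (b - (a + s) + s - 1) / s := by
        apply Int.ediv_nonneg <;> omega
      omega
    rw [if_pos hab, if_pos h2, hc, List.range_succ_eq_map]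
    simp only [List.map_cons, List.map_map]
    refine List.cons_eq_cons.mpr ⟨by simp, ?_⟩
    apply List.map_congr_left
    intro m _
    simp [Function.comp]
    ring
  · have hc : ((b - a + s - 1) / s).toNat = 1 := by
      have h1 : (b - a + s - 1) / s = 1 := by
        have he : b - a + s - 1 = (b - a - 1) + 1 * s := by ring
        rw [he, Int.add_mul_ediv_right _ _ (by omega)]
        have : (b - a - 1) / s = 0 := by
          apply Int.ediv_eq_zero_of_lt <;> omega
        omega
      omega
    rw [if_pos hab, if_neg h2, hc]
    simp [List.range_succ]

-- range(t, b + t, s) is range(0, b, s) shifted by t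
lemma pvPyRange_pos_shift (b s t : Int) (hs : 0 < s) :
    PySem.List.pyRange t (b + t) s = (PySem.List.pyRange 0 b s).map (fun j => t + j) := by
  rw [PySem.List.pyRange_of_pos _ _ hs, PySem.List.pyRange_of_pos _ _ hs]
  have hiff : (t < b + t) = (0 < b) := by
    by_cases h : 0 < b <;> simp [h]
  have harg : b + t - t + s - 1 = b - 0 + s - 1 := by ring
  simp only [hiff, harg, List.map_map]
  apply List.map_congr_left
  intro k _
  simp [Function.comp]

-- the strided slices are exactly the chunks of size n+1
lemma pvStride_chunks (n : Nat) : ∀ (ws : List String),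
    (PySem.List.pyRange 0 (ws.length : Int) ((n : Int) + 1)).map
      (fun i => PySem.List.slice ws (some i) (some (i + ((n : Int) + 1))))
    = pvChunks n ws := by
  intro ws
  induction hL : ws.length using Nat.strong_induction_on generalizing ws with
  | _ L ih =>
  subst hL
  cases ws with
  | nil =>
    have h0 : PySem.List.pyRange 0 ((([] : List String).length : Nat) : Int) ((n : Int) + 1) = [] := by
      rw [PySem.List.pyRange_of_pos _ _ (by omega)]
      simp
    rw [h0]
    simp [pvChunks_nil]
  | cons w rest =>
    have hk : (0 : Int) < (n : Int) + 1 := by omega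
    have hlen : (0 : Int) < ((w :: rest).length : Int) := by simp
    rw [pvPyRange_pos_cons _ _ _ hk hlen, List.map_cons]
    have hhead : PySem.List.slice (w :: rest) (some 0) (some (0 + ((n : Int) + 1)))
        = w :: rest.take n := by
      rw [zero_add, PySem.List.slice_toNat _ (by omega) (by omega)]
      have h1 : ((n : Int) + 1).toNat - (0 : Int).toNat = n + 1 := by omega
      rw [h1]
      simp only [Int.toNat_zero, List.drop_zero]
      exact List.take_succ_cons
    rw [hhead]
    have hb : ((w :: rest).length : Int) = (((w :: rest).length : Int) - ((n : Int) + 1)) + ((n : Int) + 1) := by ring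
    have hshift : PySem.List.pyRange (0 + ((n : Int) + 1)) ((w :: rest).length : Int) ((n : Int) + 1)
        = (PySem.List.pyRange 0 (((w :: rest).length : Int) - ((n : Int) + 1)) ((n : Int) + 1)).map
            (fun j => ((n : Int) + 1) + j) := by
      rw [zero_add]
      calc PySem.List.pyRange ((n : Int) + 1) ((w :: rest).length : Int) ((n : Int) + 1)
          = PySem.List.pyRange ((n : Int) + 1)
              ((((w :: rest).length : Int) - ((n : Int) + 1)) + ((n : Int) + 1)) ((n : Int) + 1) := by
            rw [← hb]
        _ = _ := pvPyRange_pos_shift _ _ _ hk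
    rw [hshift, List.map_map]
    have hcomp : ((fun i => PySem.List.slice (w :: rest) (some i) (some (i + ((n : Int) + 1)))) ∘
          (fun j => ((n : Int) + 1) + j))
        = fun j => PySem.List.slice (w :: rest) (some (((n : Int) + 1) + j))
            (some ((((n : Int) + 1) + j) + ((n : Int) + 1))) := rfl
    rw [hcomp]
    have hslice : ∀ j ∈ PySem.List.pyRange 0 (((w :: rest).length : Int) - ((n : Int) + 1)) ((n : Int) + 1),
        PySem.List.slice (w :: rest) (some (((n : Int) + 1) + j))
            (some ((((n : Int) + 1) + j) + ((n : Int) + 1)))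
        = PySem.List.slice (rest.drop n) (some j) (some (j + ((n : Int) + 1))) := by
      intro j hj
      have hj0 : 0 ≤ j := ((PySem.List.mem_pyRange_iff_of_pos hk j).1 hj).1
      rw [PySem.List.slice_toNat _ (by omega) (by omega),
          PySem.List.slice_toNat _ (by omega) (by omega)]
      have h1 : (((n : Int) + 1) + j).toNat = (n + 1) + j.toNat := by omega
      have h2 : ((((n : Int) + 1) + j) + ((n : Int) + 1)).toNat - (((n : Int) + 1) + j).toNat = n + 1 := by omega
      have h3 : (j + ((n : Int) + 1)).toNat - j.toNat = n + 1 := by omega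
      rw [h2, h3, h1]
      congr 1
      rw [List.drop_drop, show n + 1 + j.toNat = (n + j.toNat) + 1 by omega]
      exact List.drop_succ_cons
    rw [List.map_congr_left hslice]
    by_cases hle : n ≤ rest.length
    · have h : (((rest.drop n).length : Nat) : Int) = ((w :: rest).length : Int) - ((n : Int) + 1) := by
        simp
        omega
      have hIH := ih (rest.drop n).length (by simp) (rest.drop n) rfl
      rw [← h, hIH, pvChunks_cons']
    · have hnil : rest.drop n = [] := List.drop_eq_nil_of_le (by omega)
      have hr1 : PySem.List.pyRange 0 (((w :: rest).length : Int) - ((n : Int) + 1)) ((n : Int) + 1) = [] := by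
        rw [PySem.List.pyRange_of_pos _ _ hk, if_neg (by simp only [List.length_cons]; omega)]
        simp
      rw [hr1, pvChunks_cons', hnil]
      simp [pvChunks_nil]

-- ===== VERDICT (by name: the statement is the Claim_ definition above) =====
theorem split_into_word_groups_py_spec : Claim_equal_split_into_word_groups_py := by
  intro text target_tokens _
  unfold Spec_split_into_word_groups_py split_into_word_groups_py split_into_word_groups_py_alt
  set words := PySem.Str.split₀ text with hw
  by_cases hnil : words = []
  · simp [hnil]
  · simp only [if_neg hnil]
    set k : Int := max 10 ((target_tokens * 3).tdiv 4) with hkdef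
    have hk10 : 10 ≤ k := le_max_left _ _
    set n : Nat := (k - 1).toNat with hndef
    have hkn : k = (n : Int) + 1 := by omega
    rw [hkn]
    have hA := pvFoldA_chunks n words [] [] (by simp)
    simp only [List.nil_append] at hA
    rw [hA, ← pvStride_chunks n words]
    rw [List.map_map]
    rfl
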